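-- pv_equiv track=rewrite | github.com/MidahoX/Algorithm_Problems | Interleave Array/Solution.py | interleave_array
-- ===== SOURCE A (Python) =====
-- from collections import deque
--
-- def interleave_array(stack=[]):
--     counter = 1
--     queue = deque([])
--     while counter < len(stack):
--         while len(stack) > counter:
--             number = stack.pop()
--             queue.append(number)
--         while len(queue) > 0:
--             rear_number = queue.popleft()
--             stack.append(rear_number)
--         counter += 1
--     return stack
-- ===== SOURCE B (Python) =====
-- from collections import deque
--
-- def interleave_array(stack=[]):
--     d = deque(stack)
--     result = []
--     while d:
--         result.append(d.popleft())
--         if d: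
--             result.append(d.pop())
--     stack[:] = result
--     return stack
-- ===== Notes on version B (the rewrite author's own statement) =====
-- stated objective: faster
-- what changed: A repeatedly pops a shrinking suffix into a queue and re-appends it (reversing the suffix) once per index; B makes a single pass over a deque, appending alternately the front and back element.
import Mathlib
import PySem

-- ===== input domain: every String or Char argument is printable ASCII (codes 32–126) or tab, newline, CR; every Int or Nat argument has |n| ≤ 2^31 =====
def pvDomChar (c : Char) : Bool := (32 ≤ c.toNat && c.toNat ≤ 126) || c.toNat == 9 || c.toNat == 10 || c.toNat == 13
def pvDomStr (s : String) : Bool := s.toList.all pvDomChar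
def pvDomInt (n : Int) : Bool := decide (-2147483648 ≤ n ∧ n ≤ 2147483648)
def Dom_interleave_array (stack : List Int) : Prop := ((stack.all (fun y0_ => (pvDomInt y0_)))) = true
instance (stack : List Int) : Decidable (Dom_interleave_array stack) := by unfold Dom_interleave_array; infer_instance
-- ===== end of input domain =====

-- B replaces A's O(n^2) repeated suffix-reversal with a single O(n) pass taking elements
-- alternately from the two ends of a deque; both A and B mutate `stack` in place and the
-- final contents equal the returned list, so return-value equivalence covers the mutation too.

-- ===== PORT A =====
-- inner loop: while len(stack) > counter: number = stack.pop(); queue.append(number)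
def pvPopLoop (counter : Nat) (stack queue : List Int) : List Int × List Int :=
  if h : counter < stack.length then
    pvPopLoop counter stack.dropLast (queue ++ [stack.getLast!])
  else (stack, queue)
termination_by stack.length
decreasing_by
  have : stack ≠ [] := by intro hs; simp [hs] at h
  simp [List.length_dropLast]; omega

-- inner loop: while len(queue) > 0: rear_number = queue.popleft(); stack.append(rear_number)
def pvAppendLoop (queue stack : List Int) : List Int :=
  match queue with
  | [] => stack
  | x :: qs => pvAppendLoop qs (stack ++ [x])

-- outer loop: while counter < len(stack); fuelled (len(stack) iterations always suffice,
-- since each iteration preserves the length and increments counter)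
def pvOuterLoop : Nat → Nat → List Int → List Int
  | 0, _, s => s
  | f + 1, c, s =>
    if c < s.length then
      let p := pvPopLoop c s []
      let s' := pvAppendLoop p.2 p.1
      pvOuterLoop f (c + 1) s'
    else s

def interleave_array (stack : List Int) : List Int :=
  pvOuterLoop stack.length 1 stack

-- ===== PORT B =====
-- while d: result.append(d.popleft()); if d: result.append(d.pop())
def pvAltGo (d acc : List Int) : List Int :=
  match d with
  | [] => acc
  | a :: t =>
    if t.isEmpty then acc ++ [a]
    else pvAltGo t.dropLast (acc ++ [a, t.getLast!])
termination_by d.length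
decreasing_by simp

def interleave_array_alt (stack : List Int) : List Int :=
  pvAltGo stack []

-- ===== PRECONDITION & SPEC =====
def Spec_interleave_array (stack : List Int) (out : List Int) : Prop := out = interleave_array_alt stack
instance (stack : List Int) (out : List Int) : Decidable (Spec_interleave_array stack out) := by unfold Spec_interleave_array; infer_instance

-- ===== CLAIM (what is proved, stated in full; the proofs are below) =====
def Claim_equal_interleave_array : Prop := ∀ (stack : List Int), Dom_interleave_array stack → Spec_interleave_array stack (interleave_array stack)

-- ===== LEMMAS AND PROOFS =====

-- the common specification: two-end interleaving, phrased by the recurrence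
-- interleave (a :: t) = a :: interleave t.reverse
def pvInterleaveSpec : List Int → List Int
  | [] => []
  | a :: t => a :: pvInterleaveSpec t.reverse
termination_by l => l.length
decreasing_by simp

-- one outer-loop iteration of A, as a function: reverse the suffix starting at index c
def pvGSpec (c : Nat) (s : List Int) : List Int :=
  if h : c < s.length then pvGSpec (c + 1) (s.take c ++ (s.drop c).reverse) else s
termination_by s.length - c
decreasing_by simp; omega

theorem pvAppendLoop_eq (q s : List Int) : pvAppendLoop q s = s ++ q := by
  induction q generalizing s with
  | nil => simp [pvAppendLoop]
  | cons x qs ih => simp [pvAppendLoop, ih]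

theorem pvPopLoop_eq (c : Nat) (s q : List Int) (hc : c ≤ s.length) :
    pvPopLoop c s q = (s.take c, q ++ (s.drop c).reverse) := by
  induction s using List.reverseRecOn generalizing q with
  | nil =>
    have : c = 0 := by simpa using hc
    simp [pvPopLoop, this]
  | append_singleton l a ih =>
    rw [pvPopLoop]
    by_cases h : c < (l ++ [a]).length
    · have hcl : c ≤ l.length := by simp at h; omega
      rw [dif_pos h, List.dropLast_concat]
      have hg : (l ++ [a]).getLast! = a := by simp
      rw [hg, ih _ hcl]
      have htake : (l ++ [a]).take c = l.take c := by
        rw [List.take_append_of_le_length hcl]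
      have hdrop : (l ++ [a]).drop c = l.drop c ++ [a] := by
        rw [List.drop_append_of_le_length hcl]
      simp [htake, hdrop]
    · rw [dif_neg h]
      have : c = (l ++ [a]).length := by simp at h hc ⊢; omega
      simp [this]

theorem pvOuterLoop_eq (f c : Nat) (s : List Int) (hf : s.length - c ≤ f) :
    pvOuterLoop f c s = pvGSpec c s := by
  induction f generalizing c s with
  | zero =>
    have : ¬ c < s.length := by omega
    rw [pvOuterLoop, pvGSpec]
    simp [this]
  | succ f ih =>
    rw [pvOuterLoop, pvGSpec]
    by_cases h : c < s.length
    · simp only [h, if_pos, dif_pos]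
      rw [pvPopLoop_eq c s [] (by omega)]
      simp only [List.nil_append]
      rw [pvAppendLoop_eq]
      apply ih
      simp; omega
    · simp [h]

theorem pvGSpec_cons (c : Nat) (a : Int) (t : List Int) :
    pvGSpec (c + 1) (a :: t) = a :: pvGSpec c t := by
  conv_lhs => rw [pvGSpec]
  conv_rhs => rw [pvGSpec]
  by_cases h : c < t.length
  · have h1 : c + 1 < (a :: t).length := by simp; omega
    rw [dif_pos h1, dif_pos h]
    have : (a :: t).take (c + 1) ++ ((a :: t).drop (c + 1)).reverse
        = a :: (t.take c ++ (t.drop c).reverse) := by simp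
    rw [this, pvGSpec_cons (c + 1) a (t.take c ++ (t.drop c).reverse)]
  · have h1 : ¬ c + 1 < (a :: t).length := by simp; omega
    rw [dif_neg h1, dif_neg h]
termination_by t.length - c
decreasing_by simp; omega

theorem pvGSpec_one (s : List Int) : pvGSpec 1 s = pvInterleaveSpec s := by
  match s with
  | [] => rw [pvGSpec, pvInterleaveSpec]; simp
  | [a] => rw [pvGSpec, pvInterleaveSpec]; simp [pvInterleaveSpec]
  | a :: b :: t =>
    rw [pvGSpec]
    have h : 1 < (a :: b :: t).length := by simp
    simp only [h, dif_pos]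
    have : (a :: b :: t).take 1 ++ ((a :: b :: t).drop 1).reverse
        = a :: (b :: t).reverse := by simp
    rw [this, pvGSpec_cons, pvGSpec_one ((b :: t).reverse), pvInterleaveSpec]
termination_by s.length
decreasing_by simp

theorem pvAltGo_eq (s acc : List Int) : pvAltGo s acc = acc ++ pvInterleaveSpec s := by
  match s with
  | [] => rw [pvAltGo, pvInterleaveSpec]; simp
  | a :: t =>
    rw [pvAltGo]
    by_cases ht : t.isEmpty
    · have : t = [] := by simpa using ht
      subst this
      simp [pvInterleaveSpec]
    · have hne : t ≠ [] := by simpa using ht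
      obtain ⟨m, y, rfl⟩ : ∃ m y, t = m ++ [y] := ⟨t.dropLast, t.getLast hne, (t.dropLast_concat_getLast hne).symm⟩
      rw [if_neg ht, List.dropLast_concat]
      have hg : (m ++ [y]).getLast! = y := by simp
      rw [hg, pvAltGo_eq m (acc ++ [a, y])]
      rw [pvInterleaveSpec]
      have : (m ++ [y]).reverse = y :: m.reverse := by simp
      rw [this, pvInterleaveSpec]
      simp
termination_by s.length
decreasing_by simp_all

-- ===== VERDICT (by name: the statement is the Claim_ definition above) =====
theorem interleave_array_spec : Claim_equal_interleave_array := by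
  intro stack _
  unfold Spec_interleave_array interleave_array interleave_array_alt
  rw [pvOuterLoop_eq stack.length 1 stack (by omega), pvGSpec_one, pvAltGo_eq]
  simp
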